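-- pv_equiv track=rewrite | github.com/alfogo/cortex-cloud-upgrade-helper-cleanup | capture_headers_client.py | _extract_cookie_value
-- ===== SOURCE A (Python) =====
-- from typing import Any, Dict, Optional
--
-- def _extract_cookie_value(cookie_header: str, names) -> Optional[str]:
--     cookies: Dict[str, str] = {}
--     for chunk in cookie_header.split(";"):
--         chunk = chunk.strip()
--         if not chunk or "=" not in chunk:
--             continue
--         k, v = chunk.split("=", 1)
--         cookies[k.strip()] = v.strip()
--
--     for name in names:
--         if name in cookies:
--             return cookies[name]
--     return None
-- ===== SOURCE B (Python) =====
-- from typing import Optional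
--
-- def _extract_cookie_value(cookie_header: str, names) -> Optional[str]:
--     names = list(names)
--     best = None  # (priority index in names, value) of the best match so far
--     for chunk in cookie_header.split(";"):
--         chunk = chunk.strip()
--         if "=" not in chunk:
--             continue
--         k, v = chunk.split("=", 1)
--         key = k.strip()
--         if key not in names:
--             continue
--         i = names.index(key)
--         if best is None or i <= best[0]:
--             best = (i, v.strip())
--     return best[1] if best is not None else None
-- ===== Notes on version B (the rewrite author's own statement) =====
-- stated objective: alternative
-- what changed: Inverts the traversal: instead of building a dict and scanning names for the first hit, B makes a single pass over the cookie chunks, keeping the match with the lowest priority index in names (ties going to the later chunk, reproducing last-occurrence-wins), with no dict and no second loop.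
import Mathlib
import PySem

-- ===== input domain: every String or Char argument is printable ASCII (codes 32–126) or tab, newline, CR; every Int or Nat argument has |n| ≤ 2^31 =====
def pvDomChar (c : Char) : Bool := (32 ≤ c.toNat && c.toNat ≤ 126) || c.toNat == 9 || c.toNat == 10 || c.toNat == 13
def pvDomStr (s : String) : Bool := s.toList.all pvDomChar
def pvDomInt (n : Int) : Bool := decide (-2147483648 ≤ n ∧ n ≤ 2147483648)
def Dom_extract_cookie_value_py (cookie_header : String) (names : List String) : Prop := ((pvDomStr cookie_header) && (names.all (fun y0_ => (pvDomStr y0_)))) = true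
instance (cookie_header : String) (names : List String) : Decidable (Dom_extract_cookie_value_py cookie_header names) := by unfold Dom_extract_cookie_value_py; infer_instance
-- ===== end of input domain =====

-- B inverts A's traversal: a single pass over the cookie chunks tracking the match with the
-- lowest priority index in `names` (ties to the later chunk), no dict, no second loop (objective: alternative).


-- ===== PORT A =====
-- one iteration of A's dict-building loop over a chunk
def pvStepA (d : PySem.Dict String String) (chunk : String) : PySem.Dict String String :=
  if PySem.Str.strip chunk = "" ∨ PySem.Str.isIn "=" (PySem.Str.strip chunk) = false then d
  else
    -- "=" ∈ chunk, so chunk.split("=", 1) yields exactly [k, v]; other shapes are unreachable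
    match PySem.Str.splitMax? (PySem.Str.strip chunk) "=" 1 with
    | some (k :: v :: _) => d.insert (PySem.Str.strip k) (PySem.Str.strip v)
    | _ => d

-- A's second loop: first name present in the dict wins
def pvLookupA (cookies : PySem.Dict String String) : List String → Option String
  | [] => none
  | name :: rest =>
    match cookies.get? name with
    | some v => some v
    | none => pvLookupA cookies rest

def extract_cookie_value_py (cookie_header : String) (names : List String) : Option String :=
  -- sep ";" is a non-empty literal, so split? is always `some`; .getD [] is unreachable
  let cookies := ((PySem.Str.split? cookie_header ";").getD []).foldl pvStepA PySem.Dict.empty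
  pvLookupA cookies names

-- ===== PORT B =====
-- B's single loop body: a chunk whose stripped key occurs in `names` at index i replaces the
-- best match so far when there is none yet or i ≤ its index (so a later chunk wins ties)
def pvStepB (names : List String) (best : Option (Nat × String)) (chunk : String) : Option (Nat × String) :=
  if PySem.Str.isIn "=" (PySem.Str.strip chunk) = false then best
  else
    match PySem.Str.splitMax? (PySem.Str.strip chunk) "=" 1 with
    | some (k :: v :: _) =>
      match PySem.List.index? names (PySem.Str.strip k) with
      | none => best
      | some i =>
        match best with
        | none => some (i, PySem.Str.strip v)
        | some (j, _) => if i ≤ j then some (i, PySem.Str.strip v) else best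
    | _ => best

def extract_cookie_value_py_alt (cookie_header : String) (names : List String) : Option String :=
  ((((PySem.Str.split? cookie_header ";").getD []).foldl (pvStepB names) none)).map (·.2)

-- ===== PRECONDITION & SPEC =====
def Spec_extract_cookie_value_py (cookie_header : String) (names : List String) (out : Option String) : Prop := out = extract_cookie_value_py_alt cookie_header names
instance (cookie_header : String) (names : List String) (out : Option String) : Decidable (Spec_extract_cookie_value_py cookie_header names out) := by unfold Spec_extract_cookie_value_py; infer_instance

-- ===== CLAIM (what is proved, stated in full; the proofs are below) =====
def Claim_equal_extract_cookie_value_py : Prop := ∀ (cookie_header : String) (names : List String), Dom_extract_cookie_value_py cookie_header names → Spec_extract_cookie_value_py cookie_header names (extract_cookie_value_py cookie_header names)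

-- ===== LEMMAS AND PROOFS =====

-- proof-only helper: A's name scan, enriched with the position of the first present name
def pvLookIdx (d : PySem.Dict String String) : List String → Option (Nat × String)
  | [] => none
  | n :: rest =>
    match d.get? n with
    | some v => some (0, v)
    | none => (pvLookIdx d rest).map (fun p => (p.1 + 1, p.2))

lemma lookupA_eq_lookIdx (d : PySem.Dict String String) (names : List String) :
    pvLookupA d names = (pvLookIdx d names).map (·.2) := by
  induction names with
  | nil => rfl
  | cons n rest ih =>
    unfold pvLookupA pvLookIdx
    cases d.get? n with
    | some v => rfl
    | none => rw [ih]; cases pvLookIdx d rest <;> rfl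

lemma lookIdx_empty (names : List String) :
    pvLookIdx (PySem.Dict.empty : PySem.Dict String String) names = none := by
  induction names with
  | nil => rfl
  | cons n rest ih =>
    unfold pvLookIdx
    have : (PySem.Dict.empty : PySem.Dict String String).get? n = none := rfl
    rw [this, ih]
    rfl

-- inserting key k' with value v' shifts A's enriched scan exactly the way B's step combines
lemma lookIdx_insert (d : PySem.Dict String String) (k' v' : String) (names : List String) :
    pvLookIdx (d.insert k' v') names =
      match PySem.List.index? names k' with
      | none => pvLookIdx d names
      | some i =>
        match pvLookIdx d names with
        | none => some (i, v')
        | some (j, _) => if i ≤ j then some (i, v') else pvLookIdx d names := by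
  induction names with
  | nil => rfl
  | cons n rest ih =>
    by_cases hn : n = k'
    · subst hn
      rw [PySem.List.index?_cons_self n rest]
      unfold pvLookIdx
      rw [PySem.Dict.get?_insert_self d n v']
      cases hd : d.get? n with
      | some v => simp
      | none =>
        cases hl : (pvLookIdx d rest).map (fun p => (p.1 + 1, p.2)) with
        | none => rfl
        | some p => simp
    · rw [PySem.List.index?_cons_of_ne rest hn]
      unfold pvLookIdx
      rw [PySem.Dict.get?_insert_of_ne d v' hn]
      cases hd : d.get? n with
      | some v =>
        cases hi : PySem.List.index? rest k' with
        | none => rfl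
        | some i => simp
      | none =>
        rw [ih]
        cases hi : PySem.List.index? rest k' with
        | none => rfl
        | some i =>
          cases hl : pvLookIdx d rest with
          | none => rfl
          | some p =>
            rcases p with ⟨j, w⟩
            by_cases hij : i ≤ j
            · simp [hij]
            · simp [hij]

-- one chunk: A's dict update, viewed through the enriched scan, is exactly B's step
lemma step_lookIdx (names : List String) (d : PySem.Dict String String) (c : String) :
    pvLookIdx (pvStepA d c) names = pvStepB names (pvLookIdx d names) c := by
  unfold pvStepA pvStepB
  by_cases h : PySem.Str.isIn "=" (PySem.Str.strip c) = false
  · rw [if_pos (Or.inr h), if_pos h]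
  · have h2 : ¬ (PySem.Str.strip c = "" ∨ PySem.Str.isIn "=" (PySem.Str.strip c) = false) := by
      intro hor
      rcases hor with he | hf
      · exact h (by rw [he]; decide)
      · exact h hf
    rw [if_neg h2, if_neg h]
    rcases hm : PySem.Str.splitMax? (PySem.Str.strip c) "=" 1 with _ | l
    · rfl
    · rcases l with _ | ⟨k, _ | ⟨v, rest⟩⟩
      · rfl
      · rfl
      · exact lookIdx_insert d (PySem.Str.strip k) (PySem.Str.strip v) names

-- whole loop: A's dict build, read through the enriched scan, is B's single fold
lemma fold_lookIdx (names : List String) (chunks : List String) (d : PySem.Dict String String) :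
    pvLookIdx (chunks.foldl pvStepA d) names = chunks.foldl (pvStepB names) (pvLookIdx d names) := by
  induction chunks generalizing d with
  | nil => rfl
  | cons c cs ih =>
    simp only [List.foldl_cons]
    rw [ih (pvStepA d c), step_lookIdx]

-- ===== VERDICT (by name: the statement is the Claim_ definition above) =====
theorem extract_cookie_value_py_spec : Claim_equal_extract_cookie_value_py := by
  intro h names _
  show extract_cookie_value_py h names = extract_cookie_value_py_alt h names
  unfold extract_cookie_value_py extract_cookie_value_py_alt
  rw [lookupA_eq_lookIdx, fold_lookIdx, lookIdx_empty]
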